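-- pv_equiv track=rewrite | github.com/waveywaves/cockpit | src/cockpit/packages.py | filename_variants
-- ===== SOURCE A (Python) =====
-- def filename_variants(filename, locale):
--     base, _, ext = filename.rpartition('.')
--
--     while base:
--         if locale:
--             yield f'{base}.{locale}.{ext}'
--             yield f'{base}.{locale}.{ext}.gz'
--
--             if '_' in locale:
--                 language, _, _ = locale.partition(' ')
--                 yield f'{base}.{language}.{ext}'
--                 yield f'{base}.{language}.{ext}.gz'
--
--         yield f'{base}.{ext}'
--         yield f'{base}.min.{ext}'
--         yield f'{base}.{ext}'
--         yield f'{base}.{ext}.gz'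
--         yield f'{base}.min.{ext}.gz'
--
--         base, _, _stripped_ext = base.rpartition('.')
-- ===== SOURCE B (Python) =====
-- def filename_variants(filename, locale):
--     parts = filename.split('.')
--     ext = parts[-1]
--     tails = ['.' + ext, '.min.' + ext, '.' + ext, '.' + ext + '.gz', '.min.' + ext + '.gz']
--     if locale:
--         loc_tails = ['.' + locale + '.' + ext, '.' + locale + '.' + ext + '.gz']
--         if '_' in locale:
--             language = locale.partition(' ')[0]
--             loc_tails += ['.' + language + '.' + ext, '.' + language + '.' + ext + '.gz']
--         tails = loc_tails + tails
--     result = []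
--     base = None
--     for seg in parts[:-1]:
--         base = seg if base is None else base + '.' + seg
--         if base:
--             result = [base + t for t in tails] + result
--     return result
-- ===== Notes on version B (the rewrite author's own statement) =====
-- stated objective: alternative
-- what changed: B makes one forward pass over the dot segments, growing the base incrementally and prepending each variant block so the output is assembled back-to-front, with the variant suffix strings precomputed once; A is a backward generator loop that re-peels the base with rpartition and re-formats every variant string per base.
import Mathlib
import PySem

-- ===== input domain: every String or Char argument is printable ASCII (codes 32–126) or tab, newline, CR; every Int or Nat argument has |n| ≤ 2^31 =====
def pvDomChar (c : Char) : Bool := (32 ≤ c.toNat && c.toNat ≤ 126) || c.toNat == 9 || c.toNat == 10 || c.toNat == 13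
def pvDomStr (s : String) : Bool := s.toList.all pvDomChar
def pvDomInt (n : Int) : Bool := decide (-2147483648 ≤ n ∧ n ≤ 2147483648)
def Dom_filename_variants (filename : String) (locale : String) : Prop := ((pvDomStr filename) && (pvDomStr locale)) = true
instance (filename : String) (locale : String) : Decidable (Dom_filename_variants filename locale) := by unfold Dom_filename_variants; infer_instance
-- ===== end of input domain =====

-- B builds the same variants in one forward pass with an incremental base and precomputed
-- suffixes, prepending blocks (output assembled back-to-front); same return values everywhere.

-- ===== PORT A =====

-- Hand port of `s.rpartition('.')` (PySem has no rpartition), restricted to the two components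
-- A uses, as (before, after): exact for the single-char separator — the last '.' splits s;
-- Python's ('', '', s) no-separator case is the ([], s) branch.
def pyRPartDot (s : List Char) : List Char × List Char :=
  match s.reverse.dropWhile (· ≠ '.') with
  | [] => ([], s)
  | _ :: beforeRev => (beforeRev.reverse, (s.reverse.takeWhile (· ≠ '.')).reverse)

theorem pyRPartDot_length_lt (s : List Char) (h : s ≠ []) : (pyRPartDot s).1.length < s.length := by
  unfold pyRPartDot
  rcases hd : s.reverse.dropWhile (· ≠ '.') with _ | ⟨c, bs⟩
  · simpa [List.length_pos_iff] using h
  · have hsub : (c :: bs).length ≤ s.reverse.length := by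
      rw [← hd]; exact (List.dropWhile_sublist _).length_le
    simpa using Nat.lt_of_lt_of_le (by simp) hsub

def filename_variants_go (locale : String) (ext : List Char) (base : List Char) : List String :=
  if _h : base = [] then []
  else
    (if locale ≠ "" then
        [String.ofList (base ++ '.' :: locale.toList ++ '.' :: ext),
         String.ofList (base ++ '.' :: locale.toList ++ '.' :: ext ++ ".gz".toList)] ++
        (if PySem.Str.isIn "_" locale then
          -- locale.partition(' ')[0]: the part before the first space (whole string if none) — exact
          [String.ofList (base ++ '.' :: locale.toList.takeWhile (· ≠ ' ') ++ '.' :: ext),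
           String.ofList (base ++ '.' :: locale.toList.takeWhile (· ≠ ' ') ++ '.' :: ext ++ ".gz".toList)]
        else [])
      else []) ++
    [String.ofList (base ++ '.' :: ext),
     String.ofList (base ++ ".min.".toList ++ ext),
     String.ofList (base ++ '.' :: ext),
     String.ofList (base ++ '.' :: ext ++ ".gz".toList),
     String.ofList (base ++ ".min.".toList ++ ext ++ ".gz".toList)] ++
    filename_variants_go locale ext (pyRPartDot base).1
termination_by base.length
decreasing_by exact pyRPartDot_length_lt base _h

def filename_variants (filename : String) (locale : String) : List String :=
  let p := pyRPartDot filename.toList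
  filename_variants_go locale p.2 p.1

-- ===== PORT B =====

-- Source B's `tails` list: the variant suffixes, computed once
def pvTails (ext : List Char) (locale : String) : List (List Char) :=
  let tails : List (List Char) :=
    ['.' :: ext, ".min.".toList ++ ext, '.' :: ext,
     '.' :: ext ++ ".gz".toList, ".min.".toList ++ ext ++ ".gz".toList]
  if locale ≠ "" then
    (['.' :: locale.toList ++ '.' :: ext, '.' :: locale.toList ++ '.' :: ext ++ ".gz".toList] ++
     (if PySem.Str.isIn "_" locale then
        ['.' :: locale.toList.takeWhile (· ≠ ' ') ++ '.' :: ext,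
         '.' :: locale.toList.takeWhile (· ≠ ' ') ++ '.' :: ext ++ ".gz".toList]
      else [])) ++ tails
  else tails

-- Source B's loop body: grow the base (None on the first step), prepend the block if base nonempty
def pvStep (tails : List (List Char)) (st : Option (List Char) × List String) (seg : List Char) :
    Option (List Char) × List String :=
  let base := match st.1 with | none => seg | some b => b ++ '.' :: seg
  if base = [] then (some base, st.2)
  else (some base, tails.map (fun t => String.ofList (base ++ t)) ++ st.2)

def filename_variants_alt (filename : String) (locale : String) : List String :=
  let parts := PySem.Chars.splitOn filename.toList ['.']
  -- parts[-1]: str.split never returns [], so the lookup always succeeds and the default is unreachable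
  let ext := (PySem.List.pyGet? parts (-1)).getD []
  (parts.dropLast.foldl (pvStep (pvTails ext locale)) (none, [])).2

-- ===== PRECONDITION & SPEC =====

def Spec_filename_variants (filename : String) (locale : String) (out : List String) : Prop :=
  out = filename_variants_alt filename locale

instance (filename : String) (locale : String) (out : List String) :
    Decidable (Spec_filename_variants filename locale out) := by
  unfold Spec_filename_variants; infer_instance

-- ===== CLAIM =====

def Claim_equal_filename_variants : Prop :=
  ∀ (filename : String) (locale : String), Dom_filename_variants filename locale →
    Spec_filename_variants filename locale (filename_variants filename locale)

-- ===== LEMMAS AND PROOFS =====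

theorem splitOn_go_eq (fuel : Nat) : ∀ (l cur : List Char) (acc : List (List Char)),
    l.length ≤ fuel →
    PySem.Chars.splitOn.go ['.'] fuel l cur acc =
      acc.reverse ++ List.modifyHead (fun x => cur.reverse ++ x) (List.splitOn '.' l) := by
  induction fuel with
  | zero =>
    intro l cur acc hl
    have : l = [] := List.length_eq_zero_iff.mp (Nat.le_zero.mp hl)
    subst this
    simp [PySem.Chars.splitOn.go, List.splitOn_nil]
  | succ fuel ih =>
    intro l cur acc hl
    match l with
    | [] => simp [PySem.Chars.splitOn.go, List.splitOn_nil]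
    | c :: rest =>
      by_cases hc : c = '.'
      · subst hc
        have hpre : List.isPrefixOf ['.'] ('.' :: rest) = true := by simp [List.isPrefixOf]
        rw [PySem.Chars.splitOn.go, if_pos hpre]
        simp only [List.length_cons] at hl
        rw [ih _ _ _ (by simpa using Nat.le_of_succ_le_succ hl)]
        have hid : ∀ (l : List (List Char)), List.modifyHead (fun x => x) l = l := by
          intro l; cases l <;> simp
        simp [List.splitOn, List.splitOnP_cons, hid]
      · have hpre : List.isPrefixOf ['.'] (c :: rest) = false := by
          simp [List.isPrefixOf]; exact fun h => absurd h.symm hc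
        rw [PySem.Chars.splitOn.go, if_neg (by simp [hpre])]
        simp only [List.length_cons] at hl
        rw [ih _ _ _ (Nat.le_of_succ_le_succ hl)]
        have hne := List.splitOnP_ne_nil (fun x => x == '.') rest
        rcases hh : List.splitOnP (fun x => x == '.') rest with _ | ⟨h0, t0⟩
        · exact absurd hh hne
        · simp [List.splitOn, List.splitOnP_cons, hc, hh]

theorem splitOn_dot (s : List Char) :
    PySem.Chars.splitOn s ['.'] = List.splitOn '.' s := by
  unfold PySem.Chars.splitOn
  rw [splitOn_go_eq _ _ _ _ (Nat.le_succ _)]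
  have hne := List.splitOnP_ne_nil (fun x => x == '.') s
  rcases hh : List.splitOnP (fun x => x == '.') s with _ | ⟨h0, t0⟩
  · exact absurd hh hne
  · simp [List.splitOn, hh]

theorem splitOn_dot_free (s : List Char) : ∀ p ∈ List.splitOn '.' s, '.' ∉ p := by
  induction s with
  | nil =>
    intro p hp
    simp only [List.splitOn_nil, List.mem_singleton] at hp
    simp [hp]
  | cons c rest ih =>
    intro p hp
    by_cases hc : c = '.'
    · subst hc
      have hsp : List.splitOn '.' ('.' :: rest) = [] :: List.splitOn '.' rest := by
        simp [List.splitOn, List.splitOnP_cons]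
      rw [hsp] at hp
      rcases List.mem_cons.mp hp with hp | hp
      · simp [hp]
      · exact ih p hp
    · have hne : List.splitOn '.' rest ≠ [] := List.splitOnP_ne_nil _ _
      rcases hh : List.splitOn '.' rest with _ | ⟨h0, t0⟩
      · exact absurd hh hne
      · have hh' : List.splitOnP (fun x => x == '.') rest = h0 :: t0 := by
          simpa [List.splitOn] using hh
        have hsp : List.splitOn '.' (c :: rest) = (c :: h0) :: t0 := by
          simp [List.splitOn, List.splitOnP_cons, hc, hh']
        rw [hsp] at hp
        rcases List.mem_cons.mp hp with hp | hp
        · subst hp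
          intro hmem
          rcases List.mem_cons.mp hmem with hmem | hmem
          · exact hc hmem.symm
          · exact ih h0 (hh ▸ List.mem_cons_self) hmem
        · exact ih p (hh ▸ List.mem_cons_of_mem _ hp)

theorem intercalate_dot_cons (a : List Char) (t : List (List Char)) (h : t ≠ []) :
    ['.'].intercalate (a :: t) = a ++ '.' :: ['.'].intercalate t := by
  rcases t with _ | ⟨b, t'⟩
  · exact absurd rfl h
  · simp [List.intercalate]

theorem intercalate_dot_append (as : List (List Char)) (b : List Char) (h : as ≠ []) :
    ['.'].intercalate (as ++ [b]) = ['.'].intercalate as ++ '.' :: b := by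
  induction as with
  | nil => exact absurd rfl h
  | cons a as' ih =>
    rcases as' with _ | ⟨a2, as''⟩
    · simp [List.intercalate]
    · rw [List.cons_append, intercalate_dot_cons a ((a2 :: as'') ++ [b]) (by simp),
          ih (by simp), intercalate_dot_cons a (a2 :: as'') (by simp)]
      simp

theorem rpart_intercalate (qs : List (List Char)) (hne : qs ≠ [])
    (hfree : ∀ p ∈ qs, '.' ∉ p) :
    pyRPartDot (['.'].intercalate qs) =
      (['.'].intercalate qs.dropLast, qs.getLastD []) := by
  obtain ⟨as, b, rfl⟩ : ∃ as b, qs = as ++ [b] := by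
    rcases List.eq_nil_or_concat qs with h | ⟨as, b, h⟩
    · exact absurd h hne
    · exact ⟨as, b, by simpa [List.concat_eq_append] using h⟩
  have hbfree : '.' ∉ b := hfree b (by simp)
  have hrevfree : ∀ x ∈ b.reverse, x ≠ '.' :=
    fun x hx hxe => hbfree (hxe ▸ List.mem_reverse.mp hx)
  rcases as with _ | ⟨a0, as'⟩
  · have h1 : ['.'].intercalate [b] = b := by simp [List.intercalate]
    rw [List.nil_append, h1]
    unfold pyRPartDot
    rw [List.dropWhile_eq_nil_iff.mpr (fun x hx => decide_eq_true (hrevfree x hx))]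
    simp [List.intercalate]
  · have hinter := intercalate_dot_append (a0 :: as') b (by simp)
    rw [hinter]
    unfold pyRPartDot
    have hrev : (['.'].intercalate (a0 :: as') ++ '.' :: b).reverse =
        b.reverse ++ '.' :: (['.'].intercalate (a0 :: as')).reverse := by simp
    rw [hrev]
    have hdrop : (b.reverse ++ '.' :: (['.'].intercalate (a0 :: as')).reverse).dropWhile (· ≠ '.') =
        '.' :: (['.'].intercalate (a0 :: as')).reverse := by
      rw [List.dropWhile_append]
      rw [List.dropWhile_eq_nil_iff.mpr (fun x hx => decide_eq_true (hrevfree x hx))]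
      simp
    have htake : (b.reverse ++ '.' :: (['.'].intercalate (a0 :: as')).reverse).takeWhile (· ≠ '.') =
        b.reverse := by
      rw [List.takeWhile_append_of_pos (fun x hx => decide_eq_true (hrevfree x hx))]
      simp
    rw [hdrop]
    dsimp only
    rw [htake]
    have hdl : ((a0 :: as') ++ [b]).dropLast = a0 :: as' := List.dropLast_concat
    have hgl : ((a0 :: as') ++ [b]).getLastD [] = b := List.getLastD_concat
    simp only [List.reverse_reverse, Prod.mk.injEq]
    exact ⟨by rw [hdl], hgl.symm⟩

-- mapping the precomputed tails over `base ++ ·` is exactly A's per-base emission block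
theorem tails_map_eq (ext : List Char) (locale : String) (base : List Char) :
    (pvTails ext locale).map (fun t => String.ofList (base ++ t)) =
      (if locale ≠ "" then
          [String.ofList (base ++ '.' :: locale.toList ++ '.' :: ext),
           String.ofList (base ++ '.' :: locale.toList ++ '.' :: ext ++ ".gz".toList)] ++
          (if PySem.Str.isIn "_" locale then
            [String.ofList (base ++ '.' :: locale.toList.takeWhile (· ≠ ' ') ++ '.' :: ext),
             String.ofList (base ++ '.' :: locale.toList.takeWhile (· ≠ ' ') ++ '.' :: ext ++ ".gz".toList)]
          else [])
        else []) ++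
      [String.ofList (base ++ '.' :: ext),
       String.ofList (base ++ ".min.".toList ++ ext),
       String.ofList (base ++ '.' :: ext),
       String.ofList (base ++ '.' :: ext ++ ".gz".toList),
       String.ofList (base ++ ".min.".toList ++ ext ++ ".gz".toList)] := by
  unfold pvTails
  split_ifs with h1 h2 <;> simp [List.map]

theorem go_nil (locale : String) (ext : List Char) :
    filename_variants_go locale ext [] = [] := by
  rw [filename_variants_go]; simp

-- loop invariant: after folding segs, the base is join(segs) and the output equals A's
-- backward recursion started at join(segs)
theorem foldl_step_eq (locale : String) (ext : List Char) :
    ∀ segs : List (List Char), (∀ p ∈ segs, '.' ∉ p) →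
      segs.foldl (pvStep (pvTails ext locale)) (none, []) =
        ((if segs = [] then none else some (['.'].intercalate segs)),
         filename_variants_go locale ext (['.'].intercalate segs)) := by
  intro segs
  induction segs using List.reverseRecOn with
  | nil =>
    intro _
    simp [List.intercalate, go_nil]
  | append_singleton segs s ih =>
    intro hfree
    have hsfree : '.' ∉ s := hfree s (by simp)
    rcases segs with _ | ⟨q0, qs⟩
    · -- first iteration: base = seg
      have hJs : ['.'].intercalate [s] = s := by simp [List.intercalate]
      rw [List.nil_append, show [s] = [] ++ [s] from rfl, List.foldl_append, List.foldl_nil,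
          List.foldl_cons, List.foldl_nil, List.nil_append, hJs,
          if_neg (List.cons_ne_nil s [])]
      simp only [pvStep]
      by_cases hs : s = []
      · subst hs
        rw [if_pos rfl, go_nil]
      · rw [if_neg hs]
        conv_rhs => rw [filename_variants_go]
        rw [dif_neg hs]
        have h1 : (pyRPartDot s).1 = [] := by
          have hi : ['.'].intercalate [s] = s := by simp [List.intercalate]
          rw [← hi, rpart_intercalate [s] (by simp) (by simpa using hsfree)]
          simp [List.intercalate]
        rw [h1, go_nil, tails_map_eq, List.append_nil]
    · -- later iteration: base = prev ++ '.' ++ seg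
      have hfree' : ∀ p ∈ q0 :: qs, '.' ∉ p :=
        fun p hp => hfree p (List.mem_append_left _ hp)
      have hJ := intercalate_dot_append (q0 :: qs) s (by simp)
      have hbne : ['.'].intercalate (q0 :: qs) ++ '.' :: s ≠ [] := by simp
      rw [show q0 :: qs ++ [s] = (q0 :: qs) ++ [s] from rfl, List.foldl_append, ih hfree',
          List.foldl_cons, List.foldl_nil, if_neg (List.cons_ne_nil q0 qs),
          if_neg (show (q0 :: qs) ++ [s] ≠ [] by simp), hJ]
      simp only [pvStep]
      rw [if_neg hbne]
      conv_rhs => rw [filename_variants_go]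
      rw [dif_neg hbne]
      have h1 : (pyRPartDot (['.'].intercalate (q0 :: qs) ++ '.' :: s)).1 =
          ['.'].intercalate (q0 :: qs) := by
        rw [← hJ, rpart_intercalate ((q0 :: qs) ++ [s]) (by simp) (by simpa using hfree),
            List.dropLast_concat]
      rw [h1, tails_map_eq]

-- ===== VERDICT =====

theorem filename_variants_spec : Claim_equal_filename_variants := by
  intro filename locale _
  unfold Spec_filename_variants filename_variants filename_variants_alt
  dsimp only
  rw [splitOn_dot]
  set fl := filename.toList with hfl
  set parts := List.splitOn '.' fl with hparts
  have hne : parts ≠ [] := List.splitOnP_ne_nil _ _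
  have hfree : ∀ p ∈ parts, '.' ∉ p := splitOn_dot_free fl
  have hjoin : ['.'].intercalate parts = fl := List.intercalate_splitOn fl '.'
  have hext : (PySem.List.pyGet? parts (-1)).getD [] = parts.getLastD [] := by
    obtain ⟨p0, ps, hcons⟩ : ∃ p0 ps, parts = p0 :: ps := by
      rcases parts with _ | ⟨p0, ps⟩
      · exact absurd rfl hne
      · exact ⟨p0, ps, rfl⟩
    rw [hcons]
    rw [show PySem.List.pyGet? (p0 :: ps) (-1) = some ((p0 :: ps).getLastD []) from ?_]
    · rfl
    · simp [PySem.List.pyGet?, PySem.List.pyIdx?]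
      rw [List.getLast?_eq_getElem?]
      simp
  have hdlfree : ∀ p ∈ parts.dropLast, '.' ∉ p :=
    fun p hp => hfree p (List.mem_of_mem_dropLast hp)
  have hrp := rpart_intercalate parts hne hfree
  rw [← hjoin, hrp, hext]
  dsimp only
  rw [foldl_step_eq locale (parts.getLastD []) parts.dropLast hdlfree]
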